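-- pv_equiv track=rewrite | github.com/TheViking733n/Find-the-cat-pygame | Puzzle.py | check
-- ===== SOURCE A (Python) =====
-- def check(move):
--     n=len(move)
--     ans=""
--     for i in range(1,6):
--         ans=str(i)
--         if ans==move[0]:
--             continue
--         for j in range(2**(n-1)):
--             ans=str(i)
--             b=bin(j)
--             b=b[2:]
--             b="0"*(n-1-len(b))+b
--             for k in range(n-1):
--                 #Checking boundary
--                 if ans[k]=="1" and b[k]=="0" or ans[k]=="5" and b[k]=="1":
--                     break
--                 num=int(ans[-1])
--                 if b[k]=="0":
--                     ans+=str(num-1)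
--                 if b[k]=="1":
--                     ans+=str(num+1)
--                 #Comparing ans and move
--                 if move[k+1]==ans[k+1]:
--                     break
--             else:
--                 return ans
-- ===== SOURCE B (Python) =====
-- def check(move):
--     n = len(move)
--     # Backward feasibility table: feas[k][v] == True iff a valid walk can start
--     # at digit v at position k (v != move[k], later steps +-1 within 1..5 avoiding move).
--     feas = [[False] * 7 for _ in range(n)]
--     for v in range(1, 6):
--         feas[n - 1][v] = str(v) != move[n - 1]
--     for k in range(n - 2, -1, -1):
--         for v in range(1, 6):
--             feas[k][v] = str(v) != move[k] and (feas[k + 1][v - 1] or feas[k + 1][v + 1])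
--     # Greedy smallest-first reconstruction (lexicographically smallest valid walk).
--     for v in range(1, 6):
--         if feas[0][v]:
--             cur = v
--             ans = str(v)
--             for k in range(1, n):
--                 if feas[k][cur - 1]:
--                     cur -= 1
--                 else:
--                     cur += 1
--                 ans += str(cur)
--             return ans
--     return None
-- ===== Notes on version B (the rewrite author's own statement) =====
-- stated objective: faster
-- what changed: Replaces A's brute-force enumeration of all 5*2^(n-1) candidate +-1 walks (trying start digits 1..5 and every binary step pattern in increasing order) with a backward feasibility DP table followed by a greedy smallest-first path reconstruction.
import Mathlib
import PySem

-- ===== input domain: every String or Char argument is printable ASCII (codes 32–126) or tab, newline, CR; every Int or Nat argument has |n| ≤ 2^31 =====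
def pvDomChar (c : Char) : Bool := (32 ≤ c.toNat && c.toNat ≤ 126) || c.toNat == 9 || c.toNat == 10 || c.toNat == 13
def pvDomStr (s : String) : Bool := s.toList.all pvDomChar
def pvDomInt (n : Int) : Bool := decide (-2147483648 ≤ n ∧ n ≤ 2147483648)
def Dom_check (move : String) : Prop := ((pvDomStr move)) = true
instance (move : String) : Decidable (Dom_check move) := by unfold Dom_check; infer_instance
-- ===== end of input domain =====

-- B replaces A's enumeration of all 5*2^(n-1) candidate ±1 walks by a backward feasibility
-- DP table plus a greedy smallest-first reconstruction (asymptotically faster).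

-- ===== PORT A =====
-- b = bin(j)[2:] then "0"*(n-1-len(b)) + b  (the slice [2:] of the nonnegative "0b…" string is drop 2)
def pvMkB (n : Nat) (j : Int) : List Char :=
  let b := (PySem.Int.toBinChars0b j).drop 2
  List.replicate (n - 1 - b.length) '0' ++ b

-- the inner 'for k in range(n-1)' loop of A; the bit string b and the move tail move[1:] are
-- consumed in sync (b[k], move[k+1]); ans has length k+1 at step k, so ans[k] = ans[-1] = last char.
-- 'break' yields none; running the loop to completion yields some ans ('for … else: return ans').
def pvInnerA (ans b ms : List Char) : Option (List Char) :=
  match b, ms with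
  | bk :: bs, mk :: mrest =>
      let ak := ans.getLastD ' '                                          -- ans[k]
      if (ak = '1' ∧ bk = '0') ∨ (ak = '5' ∧ bk = '1') then none          -- boundary break
      else
        let num : Int := (PySem.Int.ofChars? [ans.getLastD ' ']).getD 0   -- num = int(ans[-1]) (always a digit here)
        let ans1 := if bk = '0' then ans ++ PySem.Int.toChars (num - 1) else ans
        let ans2 := if bk = '1' then ans1 ++ PySem.Int.toChars (num + 1) else ans1
        if mk = ans2.getLastD ' ' then none                               -- move[k+1] == ans[k+1] break
        else pvInnerA ans2 bs mrest
  | _, _ => some ans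

def check (move : String) : Option String :=
  match move.toList with
  | [] => none        -- A raises IndexError on move[0]; excluded by Pre_check
  | m0 :: rest =>
      let n := rest.length + 1
      (([1, 2, 3, 4, 5] : List Int).findSome? (fun i =>
        let ansi := PySem.Int.toChars i                                   -- ans = str(i)
        if ansi = [m0] then none                                          -- ans == move[0]: continue
        else (PySem.List.pyRange 0 (2 ^ (n - 1)) 1).findSome? (fun j =>
          pvInnerA ansi (pvMkB n j) rest))).map String.ofList

-- ===== PORT B =====
-- one row of Source B's feasibility table: [False]*7 with entries v = 1..5 filled in
def pvRowLast (c : Char) : List Bool :=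
  (List.range 7).map (fun (v : Nat) => decide (1 ≤ v ∧ v ≤ 5) && decide (PySem.Int.toChars (v : Int) ≠ [c]))

def pvRow (c : Char) (nxt : List Bool) : List Bool :=
  (List.range 7).map (fun (v : Nat) => decide (1 ≤ v ∧ v ≤ 5) &&
    (decide (PySem.Int.toChars (v : Int) ≠ [c]) && (nxt.getD (v - 1) false || nxt.getD (v + 1) false)))

-- the backward 'for k in range(n-2, -1, -1)' table loop, as structural recursion over the move chars
def pvFeas : List Char → List (List Bool)
  | [] => []
  | c :: cs =>
      match pvFeas cs with
      | [] => [pvRowLast c]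
      | r :: rs => pvRow c r :: r :: rs

-- greedy reconstruction: step down when the table allows it, else up
def pvWalk : List (List Bool) → Nat → List Char
  | [], _ => []
  | r :: rs, cur =>
      let nxt := if r.getD (cur - 1) false then cur - 1 else cur + 1
      PySem.Int.toChars (nxt : Int) ++ pvWalk rs nxt

def check_alt (move : String) : Option String :=
  match pvFeas move.toList with
  | [] => none       -- n = 0: Source B raises IndexError; excluded by Pre_check
  | r :: rs =>
      ([1, 2, 3, 4, 5] : List Nat).findSome? (fun v =>
        if r.getD v false then some (String.ofList (PySem.Int.toChars (v : Int) ++ pvWalk rs v))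
        else none)

-- ===== PRECONDITION & SPEC =====
-- A evaluates move[0], so it raises IndexError exactly on the empty string (Source B raises there too).
def Pre_check (move : String) : Prop := move ≠ ""
instance (move : String) : Decidable (Pre_check move) := by unfold Pre_check; infer_instance
def pvWitness_check : String := "2"

def Spec_check (move : String) (out : Option String) : Prop := out = check_alt move
instance (move : String) (out : Option String) : Decidable (Spec_check move out) := by unfold Spec_check; infer_instance

-- ===== CLAIM (what is proved, stated in full; the proofs are below) =====
def Claim_equal_check : Prop := ∀ (move : String), Dom_check move → Pre_check move → Spec_check move (check move)

-- ===== LEMMAS AND PROOFS =====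

-- reference semantics shared by both proofs
def pvD (v : Nat) : List Char := PySem.Int.toChars (v : Int)

def pvOk (c : Char) (v : Nat) : Bool := decide (1 ≤ v ∧ v ≤ 5) && decide (pvD v ≠ [c])

def pvFeasN : List Char → Nat → Bool
  | [], _ => true
  | c :: cs, v => (pvOk c (v - 1) && pvFeasN cs (v - 1)) || (pvOk c (v + 1) && pvFeasN cs (v + 1))

def pvGw : List Char → Nat → List Char
  | [], _ => []
  | c :: cs, v =>
      let nxt := if pvOk c (v - 1) && pvFeasN cs (v - 1) then v - 1 else v + 1
      pvD nxt ++ pvGw cs nxt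

-- ---- generic findSome? helpers ----

lemma pvFindSome_congr {α β : Type} : ∀ (l : List α) (f g : α → Option β),
    (∀ x ∈ l, f x = g x) → l.findSome? f = l.findSome? g := by
  intro l f g h
  induction l with
  | nil => rfl
  | cons x xs ih =>
      simp only [List.findSome?_cons, h x (by simp)]
      cases g x with
      | none => exact ih (fun y hy => h y (by simp [hy]))
      | some b => rfl

lemma pvFindSome_map {α β γ : Type} : ∀ (l : List α) (f : α → Option β) (g : β → γ),
    (l.findSome? f).map g = l.findSome? (fun x => (f x).map g) := by
  intro l f g
  induction l with
  | nil => rfl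
  | cons x xs ih =>
      simp only [List.findSome?_cons]
      cases f x <;> simp [ih]

-- ---- B side ----

lemma pvFeas_head : ∀ (cs : List Char) (c : Char),
    ∃ r, pvFeas (c :: cs) = r :: pvFeas cs ∧ ∀ w, r.getD w false = (pvOk c w && pvFeasN cs w) := by
  intro cs
  induction cs with
  | nil =>
      intro c
      refine ⟨pvRowLast c, rfl, fun w => ?_⟩
      by_cases hw : w < 7
      · rw [pvRowLast, PySem.List.getD_map_range _ _ _ _ hw]
        simp [pvOk, pvD, pvFeasN]
      · rw [pvRowLast, List.getD_eq_default _ _ (by simp; omega)]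
        simp [pvOk, show ¬(1 ≤ w ∧ w ≤ 5) by omega, pvFeasN]
  | cons c' cs' ih =>
      intro c
      obtain ⟨r', heq', hr'⟩ := ih c'
      refine ⟨pvRow c r', ?_, fun w => ?_⟩
      · show (match pvFeas (c' :: cs') with
              | [] => [pvRowLast c]
              | r :: rs => pvRow c r :: r :: rs) = _
        rw [heq']
      · by_cases hw : w < 7
        · rw [pvRow, PySem.List.getD_map_range _ _ _ _ hw]
          rw [hr' (w - 1), hr' (w + 1)]
          simp [pvOk, pvD, pvFeasN, Bool.and_assoc]
        · rw [pvRow, List.getD_eq_default _ _ (by simp; omega)]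
          simp [pvOk, show ¬(1 ≤ w ∧ w ≤ 5) by omega]

lemma pvWalk_eq : ∀ (cs : List Char) (v : Nat), pvWalk (pvFeas cs) v = pvGw cs v := by
  intro cs
  induction cs with
  | nil => intro v; rfl
  | cons c cs ih =>
      intro v
      obtain ⟨r, heq, hr⟩ := pvFeas_head cs c
      rw [heq, pvWalk, pvGw]
      rw [hr (v - 1), ih]
      rfl

lemma check_alt_char (m0 : Char) (rest : List Char) (move : String) (h : move.toList = m0 :: rest) :
    check_alt move = ([1,2,3,4,5] : List Nat).findSome? (fun v =>
      if pvOk m0 v && pvFeasN rest v then some (String.ofList (pvD v ++ pvGw rest v)) else none) := by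
  obtain ⟨r, heq, hr⟩ := pvFeas_head rest m0
  rw [check_alt, h, heq]
  dsimp only
  refine pvFindSome_congr _ _ _ (fun x _ => ?_)
  rw [hr x, pvWalk_eq, pvD]

-- ---- A side: binary strings ----

def pvBinAux (n : Nat) : List Char :=
  if n < 2 then [Nat.digitChar n] else pvBinAux (n / 2) ++ [Nat.digitChar (n % 2)]
decreasing_by exact Nat.div_lt_self (by omega) (by omega)

def pvBitsE : Nat → Nat → List Char
  | 0, _ => []
  | m + 1, j => pvBitsE m (j / 2) ++ [Nat.digitChar (j % 2)]

lemma pvToDigitsCore_eq : ∀ (n f : Nat) (ds : List Char), n < f →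
    Nat.toDigitsCore 2 f n ds = pvBinAux n ++ ds := by
  intro n
  induction n using Nat.strong_induction_on with
  | _ n ih =>
    intro f ds hf
    match f with
    | 0 => omega
    | f + 1 =>
      rw [Nat.toDigitsCore]
      by_cases h2 : n / 2 = 0
      · have : n < 2 := by omega
        rw [if_pos h2, pvBinAux, if_pos this, Nat.mod_eq_of_lt this]
        rfl
      · rw [if_neg h2, ih (n / 2) (by omega) f (Nat.digitChar (n % 2) :: ds) (by omega)]
        conv_rhs => rw [pvBinAux]
        rw [if_neg (by omega : ¬ n < 2), List.append_assoc]
        rfl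

lemma pvToDigits_eq (n : Nat) : Nat.toDigits 2 n = pvBinAux n := by
  rw [Nat.toDigits, pvToDigitsCore_eq n (n+1) [] (by omega), List.append_nil]

lemma pvBitsE_zero : ∀ m, pvBitsE m 0 = List.replicate m '0' := by
  intro m
  induction m with
  | zero => rfl
  | succ m ih =>
      rw [pvBitsE, Nat.zero_div, ih, show Nat.digitChar 0 = '0' from rfl, ← List.replicate_succ']

lemma pvPad_eq : ∀ (m : Nat), 1 ≤ m → ∀ j, j < 2 ^ m →
    List.replicate (m - (pvBinAux j).length) '0' ++ pvBinAux j = pvBitsE m j := by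
  intro m
  induction m with
  | zero => omega
  | succ m ih =>
      intro _ j hj
      by_cases hm : m = 0
      · subst hm
        interval_cases j <;> simp [pvBinAux, pvBitsE]
      · by_cases h2 : j < 2
        · rw [pvBinAux, if_pos h2]
          show List.replicate (m + 1 - 1) '0' ++ _ = _
          rw [pvBitsE, Nat.div_eq_of_lt h2, pvBitsE_zero, Nat.mod_eq_of_lt h2]
          simp
        · rw [pvBinAux, if_neg h2]
          have hlen : (pvBinAux (j/2) ++ [Nat.digitChar (j % 2)]).length = (pvBinAux (j/2)).length + 1 := by simp
          rw [hlen]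
          have hj2 : j / 2 < 2 ^ m := by
            have : 2 ^ (m+1) = 2 * 2 ^ m := by ring
            omega
          rw [show m + 1 - ((pvBinAux (j/2)).length + 1) = m - (pvBinAux (j/2)).length by omega]
          rw [pvBitsE, ← ih (by omega) (j/2) hj2]
          simp

lemma pvMkB_eq (m j : Nat) (hj : j < 2 ^ m) :
    ∃ ext, pvMkB (m + 1) (j : Int) = pvBitsE m j ++ ext := by
  have hb : (PySem.Int.toBinChars0b (j : Int)).drop 2 = pvBinAux j := by
    rw [PySem.Int.toBinChars0b, if_neg (by omega : ¬ (j : Int) < 0)]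
    simp [pvToDigits_eq j]
  by_cases hm : m = 0
  · subst hm
    have : j = 0 := by omega
    subst this
    exact ⟨['0'], rfl⟩
  · refine ⟨[], ?_⟩
    rw [List.append_nil]
    show List.replicate (m + 1 - 1 - ((PySem.Int.toBinChars0b (j : Int)).drop 2).length) '0' ++
      (PySem.Int.toBinChars0b (j : Int)).drop 2 = _
    rw [hb, Nat.add_sub_cancel]
    exact pvPad_eq m (by omega) j hj

lemma pvBitsE_half (m : Nat) : ∀ j, j < 2 ^ m →
    pvBitsE (m + 1) j = '0' :: pvBitsE m j ∧ pvBitsE (m + 1) (2 ^ m + j) = '1' :: pvBitsE m j := by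
  induction m with
  | zero =>
      intro j hj
      interval_cases j
      constructor <;> rfl
  | succ m ih =>
      intro j hj
      have hpow : 2 ^ (m + 1) = 2 * 2 ^ m := by ring
      have hj2 : j / 2 < 2 ^ m := by omega
      obtain ⟨ih0, ih1⟩ := ih (j / 2) hj2
      constructor
      · show pvBitsE (m+2) j = _
        rw [pvBitsE, ih0]
        rfl
      · show pvBitsE (m+2) (2 ^ (m+1) + j) = _
        rw [pvBitsE]
        have hd : (2 ^ (m+1) + j) / 2 = 2 ^ m + j / 2 := by omega
        have hm : (2 ^ (m+1) + j) % 2 = j % 2 := by omega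
        rw [hd, hm, ih1]
        rfl

-- ---- A side: inner loop ----

lemma pvInnerA_nil (ans b : List Char) : pvInnerA ans b [] = some ans := by
  cases b <;> rfl

lemma pvInnerA_ext : ∀ (cs ans b ext : List Char), b.length = cs.length →
    pvInnerA ans (b ++ ext) cs = pvInnerA ans b cs := by
  intro cs
  induction cs with
  | nil => intro ans b ext _; rw [pvInnerA_nil, pvInnerA_nil]
  | cons c ms ih =>
      intro ans b ext h
      match b with
      | bk :: bs =>
          show pvInnerA ans (bk :: (bs ++ ext)) (c :: ms) = _
          rw [pvInnerA, pvInnerA]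
          dsimp only
          split_ifs with h1 h2 <;> first
            | rfl
            | exact ih _ _ _ (by simpa using h)

lemma pvInner_step0 (v : Nat) (h1 : 1 ≤ v) (h5 : v ≤ 5) (pre bs ms : List Char) (c : Char) :
    pvInnerA (pre ++ pvD v) ('0' :: bs) (c :: ms) =
      if pvOk c (v - 1) then pvInnerA (pre ++ pvD v ++ pvD (v - 1)) bs ms else none := by
  interval_cases v
  · rw [pvInnerA]; dsimp only
    rw [show pvD 1 = ['1'] from rfl, List.getLastD_concat]
    rw [if_pos (Or.inl ⟨rfl, rfl⟩ : ('1' : Char) = '1' ∧ ('0' : Char) = '0' ∨ ('1' : Char) = '5' ∧ ('0' : Char) = '1')]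
    simp [pvOk]
  · rw [pvInnerA]; dsimp only
    rw [show pvD 2 = ['2'] from rfl, List.getLastD_concat]
    rw [if_neg (by decide : ¬(('2' : Char) = '1' ∧ ('0' : Char) = '0' ∨ ('2' : Char) = '5' ∧ ('0' : Char) = '1'))]
    rw [if_pos (rfl : ('0' : Char) = '0'), if_neg (by decide : ¬('0' : Char) = '1')]
    rw [show PySem.Int.toChars ((PySem.Int.ofChars? ['2']).getD 0 - 1) = ['1'] from rfl]
    rw [List.getLastD_concat]
    rw [show pvD (2 - 1) = ['1'] from rfl]
    have hok : pvOk c (2 - 1) = !decide (c = '1') := by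
      rw [pvOk, show pvD (2 - 1) = ['1'] from rfl]
      by_cases hc : c = '1' <;> simp [hc, eq_comm]
    rw [hok]
    by_cases hc : c = '1' <;> simp [hc]
  · rw [pvInnerA]; dsimp only
    rw [show pvD 3 = ['3'] from rfl, List.getLastD_concat]
    rw [if_neg (by decide : ¬(('3' : Char) = '1' ∧ ('0' : Char) = '0' ∨ ('3' : Char) = '5' ∧ ('0' : Char) = '1'))]
    rw [if_pos (rfl : ('0' : Char) = '0'), if_neg (by decide : ¬('0' : Char) = '1')]
    rw [show PySem.Int.toChars ((PySem.Int.ofChars? ['3']).getD 0 - 1) = ['2'] from rfl]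
    rw [List.getLastD_concat]
    rw [show pvD (3 - 1) = ['2'] from rfl]
    have hok : pvOk c (3 - 1) = !decide (c = '2') := by
      rw [pvOk, show pvD (3 - 1) = ['2'] from rfl]
      by_cases hc : c = '2' <;> simp [hc, eq_comm]
    rw [hok]
    by_cases hc : c = '2' <;> simp [hc]
  · rw [pvInnerA]; dsimp only
    rw [show pvD 4 = ['4'] from rfl, List.getLastD_concat]
    rw [if_neg (by decide : ¬(('4' : Char) = '1' ∧ ('0' : Char) = '0' ∨ ('4' : Char) = '5' ∧ ('0' : Char) = '1'))]
    rw [if_pos (rfl : ('0' : Char) = '0'), if_neg (by decide : ¬('0' : Char) = '1')]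
    rw [show PySem.Int.toChars ((PySem.Int.ofChars? ['4']).getD 0 - 1) = ['3'] from rfl]
    rw [List.getLastD_concat]
    rw [show pvD (4 - 1) = ['3'] from rfl]
    have hok : pvOk c (4 - 1) = !decide (c = '3') := by
      rw [pvOk, show pvD (4 - 1) = ['3'] from rfl]
      by_cases hc : c = '3' <;> simp [hc, eq_comm]
    rw [hok]
    by_cases hc : c = '3' <;> simp [hc]
  · rw [pvInnerA]; dsimp only
    rw [show pvD 5 = ['5'] from rfl, List.getLastD_concat]
    rw [if_neg (by decide : ¬(('5' : Char) = '1' ∧ ('0' : Char) = '0' ∨ ('5' : Char) = '5' ∧ ('0' : Char) = '1'))]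
    rw [if_pos (rfl : ('0' : Char) = '0'), if_neg (by decide : ¬('0' : Char) = '1')]
    rw [show PySem.Int.toChars ((PySem.Int.ofChars? ['5']).getD 0 - 1) = ['4'] from rfl]
    rw [List.getLastD_concat]
    rw [show pvD (5 - 1) = ['4'] from rfl]
    have hok : pvOk c (5 - 1) = !decide (c = '4') := by
      rw [pvOk, show pvD (5 - 1) = ['4'] from rfl]
      by_cases hc : c = '4' <;> simp [hc, eq_comm]
    rw [hok]
    by_cases hc : c = '4' <;> simp [hc]

lemma pvInner_step1 (v : Nat) (h1 : 1 ≤ v) (h5 : v ≤ 5) (pre bs ms : List Char) (c : Char) :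
    pvInnerA (pre ++ pvD v) ('1' :: bs) (c :: ms) =
      if pvOk c (v + 1) then pvInnerA (pre ++ pvD v ++ pvD (v + 1)) bs ms else none := by
  interval_cases v
  · rw [pvInnerA]; dsimp only
    rw [show pvD 1 = ['1'] from rfl, List.getLastD_concat]
    rw [if_neg (by decide : ¬(('1' : Char) = '1' ∧ ('1' : Char) = '0' ∨ ('1' : Char) = '5' ∧ ('1' : Char) = '1'))]
    rw [if_neg (by decide : ¬('1' : Char) = '0'), if_pos (rfl : ('1' : Char) = '1')]
    rw [show PySem.Int.toChars ((PySem.Int.ofChars? ['1']).getD 0 + 1) = ['2'] from rfl]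
    rw [List.getLastD_concat]
    rw [show pvD (1 + 1) = ['2'] from rfl]
    have hok : pvOk c (1 + 1) = !decide (c = '2') := by
      rw [pvOk, show pvD (1 + 1) = ['2'] from rfl]
      by_cases hc : c = '2' <;> simp [hc, eq_comm]
    rw [hok]
    by_cases hc : c = '2' <;> simp [hc]
  · rw [pvInnerA]; dsimp only
    rw [show pvD 2 = ['2'] from rfl, List.getLastD_concat]
    rw [if_neg (by decide : ¬(('2' : Char) = '1' ∧ ('1' : Char) = '0' ∨ ('2' : Char) = '5' ∧ ('1' : Char) = '1'))]
    rw [if_neg (by decide : ¬('1' : Char) = '0'), if_pos (rfl : ('1' : Char) = '1')]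
    rw [show PySem.Int.toChars ((PySem.Int.ofChars? ['2']).getD 0 + 1) = ['3'] from rfl]
    rw [List.getLastD_concat]
    rw [show pvD (2 + 1) = ['3'] from rfl]
    have hok : pvOk c (2 + 1) = !decide (c = '3') := by
      rw [pvOk, show pvD (2 + 1) = ['3'] from rfl]
      by_cases hc : c = '3' <;> simp [hc, eq_comm]
    rw [hok]
    by_cases hc : c = '3' <;> simp [hc]
  · rw [pvInnerA]; dsimp only
    rw [show pvD 3 = ['3'] from rfl, List.getLastD_concat]
    rw [if_neg (by decide : ¬(('3' : Char) = '1' ∧ ('1' : Char) = '0' ∨ ('3' : Char) = '5' ∧ ('1' : Char) = '1'))]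
    rw [if_neg (by decide : ¬('1' : Char) = '0'), if_pos (rfl : ('1' : Char) = '1')]
    rw [show PySem.Int.toChars ((PySem.Int.ofChars? ['3']).getD 0 + 1) = ['4'] from rfl]
    rw [List.getLastD_concat]
    rw [show pvD (3 + 1) = ['4'] from rfl]
    have hok : pvOk c (3 + 1) = !decide (c = '4') := by
      rw [pvOk, show pvD (3 + 1) = ['4'] from rfl]
      by_cases hc : c = '4' <;> simp [hc, eq_comm]
    rw [hok]
    by_cases hc : c = '4' <;> simp [hc]
  · rw [pvInnerA]; dsimp only
    rw [show pvD 4 = ['4'] from rfl, List.getLastD_concat]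
    rw [if_neg (by decide : ¬(('4' : Char) = '1' ∧ ('1' : Char) = '0' ∨ ('4' : Char) = '5' ∧ ('1' : Char) = '1'))]
    rw [if_neg (by decide : ¬('1' : Char) = '0'), if_pos (rfl : ('1' : Char) = '1')]
    rw [show PySem.Int.toChars ((PySem.Int.ofChars? ['4']).getD 0 + 1) = ['5'] from rfl]
    rw [List.getLastD_concat]
    rw [show pvD (4 + 1) = ['5'] from rfl]
    have hok : pvOk c (4 + 1) = !decide (c = '5') := by
      rw [pvOk, show pvD (4 + 1) = ['5'] from rfl]
      by_cases hc : c = '5' <;> simp [hc, eq_comm]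
    rw [hok]
    by_cases hc : c = '5' <;> simp [hc]
  · rw [pvInnerA]; dsimp only
    rw [show pvD 5 = ['5'] from rfl, List.getLastD_concat]
    rw [if_pos (Or.inr ⟨rfl, rfl⟩ : ('5' : Char) = '1' ∧ ('1' : Char) = '0' ∨ ('5' : Char) = '5' ∧ ('1' : Char) = '1')]
    simp [pvOk]


lemma pvBoundsOfOk {c : Char} {v : Nat} (h : pvOk c v = true) : 1 ≤ v ∧ v ≤ 5 := by
  rw [pvOk, Bool.and_eq_true, decide_eq_true_iff] at h
  exact h.1

lemma pvSearchA : ∀ (cs : List Char) (v : Nat) (ans : List Char), 1 ≤ v → v ≤ 5 →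
    (∃ pre, ans = pre ++ pvD v) →
    (List.range (2 ^ cs.length)).findSome? (fun j => pvInnerA ans (pvBitsE cs.length j) cs)
      = if pvFeasN cs v then some (ans ++ pvGw cs v) else none := by
  intro cs
  induction cs with
  | nil =>
      intro v ans h1 h5 _
      simp [List.range_one, pvInnerA_nil, pvFeasN, pvGw]
  | cons c cs ih =>
      intro v ans h1 h5 ⟨pre, hpre⟩
      have hlen : (c :: cs).length = cs.length + 1 := rfl
      rw [hlen, show 2 ^ (cs.length + 1) = 2 ^ cs.length + 2 ^ cs.length by ring,
        List.range_add, List.findSome?_append, List.findSome?_map]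
      -- first half: leading bit '0' (step down), in j-ascending = lexicographic order
      have hfst : (List.range (2 ^ cs.length)).findSome?
            (fun j => pvInnerA ans (pvBitsE (cs.length + 1) j) (c :: cs))
          = if pvOk c (v - 1) && pvFeasN cs (v - 1)
              then some (ans ++ pvD (v - 1) ++ pvGw cs (v - 1)) else none := by
        have hcg : ∀ j ∈ List.range (2 ^ cs.length),
            pvInnerA ans (pvBitsE (cs.length + 1) j) (c :: cs)
              = if pvOk c (v - 1) then pvInnerA (ans ++ pvD (v - 1)) (pvBitsE cs.length j) cs
                else none := by
          intro j hj
          rw [(pvBitsE_half cs.length j (List.mem_range.mp hj)).1, hpre, pvInner_step0 v h1 h5]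
        rw [pvFindSome_congr _ _ _ hcg]
        by_cases h0 : pvOk c (v - 1)
        · obtain ⟨hb1, hb5⟩ := pvBoundsOfOk h0
          simp only [h0, if_true]
          rw [ih (v - 1) (ans ++ pvD (v - 1)) hb1 hb5 ⟨ans, rfl⟩]
          simp
        · simp [h0, List.findSome?_eq_none_iff]
      -- second half: leading bit '1' (step up)
      have hsnd : (List.range (2 ^ cs.length)).findSome?
            ((fun j => pvInnerA ans (pvBitsE (cs.length + 1) j) (c :: cs)) ∘
              fun x => 2 ^ cs.length + x)
          = if pvOk c (v + 1) && pvFeasN cs (v + 1)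
              then some (ans ++ pvD (v + 1) ++ pvGw cs (v + 1)) else none := by
        have hcg : ∀ j ∈ List.range (2 ^ cs.length),
            pvInnerA ans (pvBitsE (cs.length + 1) (2 ^ cs.length + j)) (c :: cs)
              = if pvOk c (v + 1) then pvInnerA (ans ++ pvD (v + 1)) (pvBitsE cs.length j) cs
                else none := by
          intro j hj
          rw [(pvBitsE_half cs.length j (List.mem_range.mp hj)).2, hpre, pvInner_step1 v h1 h5]
        simp only [Function.comp_def]
        rw [pvFindSome_congr _ _ _ hcg]
        by_cases h0 : pvOk c (v + 1)
        · obtain ⟨hb1, hb5⟩ := pvBoundsOfOk h0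
          simp only [h0, if_true]
          rw [ih (v + 1) (ans ++ pvD (v + 1)) hb1 hb5 ⟨ans, rfl⟩]
          simp
        · simp [h0, List.findSome?_eq_none_iff]
      rw [hfst, hsnd, pvFeasN, pvGw]
      by_cases hA : pvOk c (v - 1) && pvFeasN cs (v - 1) <;>
        by_cases hB : pvOk c (v + 1) && pvFeasN cs (v + 1) <;>
          simp [hA, hB, List.append_assoc]

lemma pvBitsE_len : ∀ (m j : Nat), (pvBitsE m j).length = m := by
  intro m
  induction m with
  | zero => intro j; rfl
  | succ m ih => intro j; simp [pvBitsE, ih]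

lemma pvEntryA (m0 : Char) (rest : List Char) (i : Nat) (h1 : 1 ≤ i) (h5 : i ≤ 5) :
    Option.map String.ofList
      (if PySem.Int.toChars ((i : Nat) : Int) = [m0] then none
       else (PySem.List.pyRange 0 (2 ^ (rest.length + 1 - 1)) 1).findSome? (fun j =>
         pvInnerA (PySem.Int.toChars ((i : Nat) : Int)) (pvMkB (rest.length + 1) j) rest))
    = if pvOk m0 i && pvFeasN rest i then some (String.ofList (pvD i ++ pvGw rest i)) else none := by
  rw [Nat.add_sub_cancel,
    show ((2 : Int) ^ rest.length) = (((2 ^ rest.length : Nat)) : Int) by push_cast; rfl,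
    PySem.List.pyRange_zero_natCast, List.findSome?_map]
  have hsearch : (List.range (2 ^ rest.length)).findSome?
        ((fun j => pvInnerA (PySem.Int.toChars ((i : Nat) : Int)) (pvMkB (rest.length + 1) j) rest)
          ∘ fun (k : Nat) => (k : Int))
      = if pvFeasN rest i then some (pvD i ++ pvGw rest i) else none := by
    simp only [Function.comp_def]
    have hpt : ∀ j ∈ List.range (2 ^ rest.length),
        pvInnerA (PySem.Int.toChars ((i : Nat) : Int)) (pvMkB (rest.length + 1) ((j : Nat) : Int)) rest
          = pvInnerA (pvD i) (pvBitsE rest.length j) rest := by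
      intro j hj
      obtain ⟨ext, hext⟩ := pvMkB_eq rest.length j (List.mem_range.mp hj)
      rw [show PySem.Int.toChars ((i : Nat) : Int) = pvD i from rfl, hext,
        pvInnerA_ext rest _ _ ext (pvBitsE_len rest.length j)]
    rw [pvFindSome_congr _ _ _ hpt, pvSearchA rest i (pvD i) h1 h5 ⟨[], rfl⟩]
  by_cases hD : pvD i = [m0]
  · rw [if_pos (show PySem.Int.toChars ((i : Nat) : Int) = [m0] from hD)]
    have : pvOk m0 i = false := by simp [pvOk, hD]
    simp [this]
  · rw [if_neg (show ¬ PySem.Int.toChars ((i : Nat) : Int) = [m0] from hD), hsearch]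
    have : pvOk m0 i = true := by simp [pvOk, h1, h5, hD]
    by_cases hF : pvFeasN rest i <;> simp [this, hF]

lemma check_char (m0 : Char) (rest : List Char) (move : String) (h : move.toList = m0 :: rest) :
    check move = ([1,2,3,4,5] : List Nat).findSome? (fun v =>
      if pvOk m0 v && pvFeasN rest v then some (String.ofList (pvD v ++ pvGw rest v)) else none) := by
  rw [check, h]
  dsimp only
  rw [show ([1, 2, 3, 4, 5] : List Int) = List.map (fun k : Nat => (k : Int)) [1, 2, 3, 4, 5]
      from rfl,
    List.findSome?_map, pvFindSome_map]
  refine pvFindSome_congr _ _ _ (fun x hx => ?_)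
  have h15 : 1 ≤ x ∧ x ≤ 5 := by fin_cases hx <;> omega
  exact pvEntryA m0 rest x h15.1 h15.2

-- ===== VERDICT (by name: the statement is the Claim_ definition above) =====
theorem check_spec : Claim_equal_check := by
  intro move _ hpre
  unfold Spec_check
  match h : move.toList with
  | [] =>
      exact absurd (String.toList_eq_nil_iff.mp h) hpre
  | m0 :: rest =>
      rw [check_char m0 rest move h, check_alt_char m0 rest move h]
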